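-- pv_equiv track=rewrite | github.com/centry-core/auth | module.py | generate_permissions
-- ===== SOURCE A (Python) =====
-- def generate_permissions(permission_dict: dict[str, str]) -> set[str]:
--     """ Prepare permission set """
--     # actions = {'edit', 'create', 'delete', 'view'}
--     actions = set()
--     if user_action := permission_dict.pop('action', None):
--         actions.add(user_action)
--     result = set()
--     parent = ""
--     for scope_name, scope in permission_dict.items():
--         if not scope:
--             break
--         parent += scope
--         if scope_name == 'item':
--             for action in actions:
--                 result.add(parent + '.' + action)
--         else:
--             result.add(parent)
--         parent += '.'
--
--     return result
-- ===== SOURCE B (Python) =====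
-- def generate_permissions(permission_dict):
--     """Prepare permission set (same pop('action') mutation as the original)."""
--     user_action = permission_dict.pop('action', None)
--     actions = {user_action} if user_action else set()
--     # entries up to (not including) the first falsy scope
--     entries = []
--     for name, scope in permission_dict.items():
--         if not scope:
--             break
--         entries.append((name, scope))
--     scopes = [s for _, s in entries]
--     prefixes = ['.'.join(scopes[:i + 1]) for i in range(len(entries))]
--     result = set()
--     for (name, _), prefix in zip(entries, prefixes):
--         if name == 'item':
--             result.update(prefix + '.' + a for a in actions)
--         else:
--             result.add(prefix)
--     return result
-- ===== Notes on version B (the rewrite author's own statement) =====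
-- stated objective: alternative
-- what changed: Replaces the single loop that mutates a running `parent` accumulator with three separate phases: collect entries up to the first falsy scope, compute each cumulative prefix in closed form as '.'.join(scopes[:i+1]), then emit permissions in a final pass over (entry, prefix) pairs.
import Mathlib
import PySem

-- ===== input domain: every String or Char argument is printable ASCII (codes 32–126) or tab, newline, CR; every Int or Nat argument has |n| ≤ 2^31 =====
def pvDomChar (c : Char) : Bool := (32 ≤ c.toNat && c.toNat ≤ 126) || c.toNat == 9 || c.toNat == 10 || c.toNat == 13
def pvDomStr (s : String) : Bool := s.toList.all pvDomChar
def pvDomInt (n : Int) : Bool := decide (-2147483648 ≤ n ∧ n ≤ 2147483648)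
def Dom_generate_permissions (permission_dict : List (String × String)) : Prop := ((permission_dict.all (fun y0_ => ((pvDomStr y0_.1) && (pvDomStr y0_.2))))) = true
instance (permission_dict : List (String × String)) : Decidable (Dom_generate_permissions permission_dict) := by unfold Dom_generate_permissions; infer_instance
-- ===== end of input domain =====

-- B replaces A's single loop with a running `parent` accumulator by take-until-falsy +
-- closed-form '.'-joined prefixes + a separate emission pass (objective: alternative).
-- Both Pythons pop 'action' from the argument dict; the equivalence proved here is about
-- the RETURN value only (B performs the same mutation).
-- The assoc list is read as the Python dict via PySem.Dict.ofList (first position,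
-- last value for a repeated key), exactly as Python dict construction collapses it.

-- ===== PORT A =====
-- for each entry: break on falsy scope, extend parent, emit
def pvLoopA (actions : PySem.Set String) :
    List (String × String) → PySem.Set String → String → PySem.Set String
  | [], result, _ => result
  | (scope_name, scope) :: rest, result, parent =>
    if scope = "" then result
    else
      let parent := parent ++ scope
      let result :=
        if scope_name = "item" then
          -- actions has at most one element, so set-iteration order is immaterial
          actions.foldl (fun r a => PySem.Set.add r (parent ++ "." ++ a)) result
        else PySem.Set.add result parent
      pvLoopA actions rest result (parent ++ ".")

def generate_permissions (permission_dict : List (String × String)) : List String :=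
  let d := PySem.Dict.ofList permission_dict
  let user_action := d.get? "action"        -- pop('action', None): value …
  let d := d.erase "action"                 -- … and removal
  let actions : PySem.Set String :=
    match user_action with
    | some a => if a = "" then PySem.Set.empty else PySem.Set.add PySem.Set.empty a
    | none => PySem.Set.empty
  pvLoopA actions d.items PySem.Set.empty ""

-- ===== PORT B =====
-- entries up to (not including) the first falsy scope
def pvTakeUntilFalsy : List (String × String) → List (String × String)
  | [] => []
  | (name, scope) :: rest =>
    if scope = "" then [] else (name, scope) :: pvTakeUntilFalsy rest

def generate_permissions_alt (permission_dict : List (String × String)) : List String :=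
  let d := PySem.Dict.ofList permission_dict
  let user_action := d.get? "action"        -- same pop('action', None)
  let d := d.erase "action"
  let actions : PySem.Set String :=
    match user_action with
    | some a => if a = "" then PySem.Set.empty else PySem.Set.add PySem.Set.empty a
    | none => PySem.Set.empty
  let entries := pvTakeUntilFalsy d.items
  let scopes := entries.map Prod.snd
  let prefixes := (List.range entries.length).map
    (fun i => PySem.Str.join "." (scopes.take (i + 1)))
  (entries.zip prefixes).foldl
    (fun r p =>
      if p.1.1 = "item" then
        actions.foldl (fun r a => PySem.Set.add r (p.2 ++ "." ++ a)) r
      else PySem.Set.add r p.2)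
    PySem.Set.empty

-- ===== PRECONDITION & SPEC =====
def Spec_generate_permissions (permission_dict : List (String × String)) (out : List String) : Prop := out = generate_permissions_alt permission_dict
instance (permission_dict : List (String × String)) (out : List String) : Decidable (Spec_generate_permissions permission_dict out) := by unfold Spec_generate_permissions; infer_instance

-- ===== CLAIM (what is proved, stated in full; the proofs are below) =====
def Claim_equal_generate_permissions : Prop := ∀ (permission_dict : List (String × String)), Dom_generate_permissions permission_dict → Spec_generate_permissions permission_dict (generate_permissions permission_dict)

-- ===== LEMMAS AND PROOFS =====

theorem str_eq_of_toList (s t : String) (h : s.toList = t.toList) : s = t := by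
  have := congrArg String.ofList h
  simpa using this

theorem joinDot_singleton (s : String) : PySem.Str.join "." [s] = s := by
  apply str_eq_of_toList
  simp [PySem.Str.toList_join, PySem.Chars.join_singleton]

theorem joinDot_cons (s : String) (l : List String) (h : l ≠ []) :
    PySem.Str.join "." (s :: l) = s ++ "." ++ PySem.Str.join "." l := by
  cases l with
  | nil => exact absurd rfl h
  | cons q rest =>
    apply str_eq_of_toList
    simp [PySem.Str.toList_join, PySem.Chars.join_cons_cons]

-- A's loop computes the zip-with-prefixes fold of B, generalized over `parent`.
theorem pvLoopA_eq (actions : PySem.Set String) (rest : List (String × String)) :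
    ∀ (result : PySem.Set String) (parent : String),
    pvLoopA actions rest result parent =
      ((pvTakeUntilFalsy rest).zip
        ((List.range (pvTakeUntilFalsy rest).length).map
          (fun i => parent ++ PySem.Str.join "."
            (((pvTakeUntilFalsy rest).map Prod.snd).take (i + 1))))).foldl
        (fun r p =>
          if p.1.1 = "item" then
            actions.foldl (fun r a => PySem.Set.add r (p.2 ++ "." ++ a)) r
          else PySem.Set.add r p.2)
        result := by
  induction rest with
  | nil => intro result parent; simp [pvLoopA, pvTakeUntilFalsy]
  | cons hd tl ih =>
    intro result parent
    obtain ⟨name, scope⟩ := hd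
    by_cases hs : scope = ""
    · simp [pvLoopA, pvTakeUntilFalsy, hs]
    · rw [pvLoopA, pvTakeUntilFalsy, if_neg hs, if_neg hs]
      rw [ih]
      have hrange : List.range ((pvTakeUntilFalsy tl).length + 1)
          = 0 :: (List.range (pvTakeUntilFalsy tl).length).map Nat.succ :=
        List.range_succ_eq_map
      simp only [List.length_cons, hrange, List.map_cons, List.map_map, List.zip_cons_cons,
        List.foldl_cons, List.take_succ_cons, List.take_zero, Function.comp_def]
      rw [joinDot_singleton]
      congr 2
      apply List.map_congr_left
      intro i hi
      have hi' : i < (pvTakeUntilFalsy tl).length := List.mem_range.mp hi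
      have hne : ((pvTakeUntilFalsy tl).map Prod.snd).take (i + 1) ≠ [] := by
        have : ((pvTakeUntilFalsy tl).map Prod.snd).take (i + 1) ≠ [] ↔
            0 < min (i + 1) ((pvTakeUntilFalsy tl).map Prod.snd).length := by
          rw [← List.length_pos_iff, List.length_take]
        rw [this]; simp; omega
      rw [joinDot_cons _ _ hne]
      simp [String.append_assoc]

-- ===== VERDICT (by name: the statement is the Claim_ definition above) =====
theorem generate_permissions_spec : Claim_equal_generate_permissions := by
  intro pd _
  unfold Spec_generate_permissions generate_permissions generate_permissions_alt
  rw [pvLoopA_eq]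
  simp
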